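-- pv_equiv track=rewrite | github.com/MeepMoop/battlestar | battlestar_generator.py | compute_candidates
-- ===== SOURCE A (Python) =====
-- def compute_candidates(size, n_stars):
--   def recurse(candidates, cols=[]):
--     if len(cols) == n_stars:
--       candidates.append(cols)
--       return
--     for c in range(cols[-1] + 2 if cols else 0, size - 2 * (n_stars - len(cols) - 1)):
--       recurse(candidates, cols + [c])
--   candidates = []; recurse(candidates)
--   return candidates
-- ===== SOURCE B (Python) =====
-- def compute_candidates(size, n_stars):
--     # Bijection: columns with gap >= 2 <-> strictly increasing tuples over
--     # range(m), m = size - n_stars + 1, via c_i = d_i + i.  No such tuple exists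
--     # when more stars are requested than slots; otherwise build the strictly
--     # increasing tuples breadth-first, level by level, then shift.
--     m = size - n_stars + 1
--     if n_stars > 0 and n_stars > m:
--         return []
--     combos = [[]]
--     for _ in range(n_stars):
--         combos = [c + [d] for c in combos for d in range(c[-1] + 1 if c else 0, m)]
--     return [[d + i for i, d in enumerate(c)] for c in combos]
-- ===== Notes on version B (the rewrite author's own statement) =====
-- stated objective: alternative
-- what changed: Replaced the depth-first backtracking recursion (with per-level tightened bounds) by a breadth-first, level-by-level product build of strictly increasing tuples over the shifted domain range(size-n_stars+1), mapped back to gap>=2 columns via c_i = d_i + i.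
-- outside the precondition, e.g. on compute_candidates(-6, -1): A returns [], B returns [[]]
import Mathlib
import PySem

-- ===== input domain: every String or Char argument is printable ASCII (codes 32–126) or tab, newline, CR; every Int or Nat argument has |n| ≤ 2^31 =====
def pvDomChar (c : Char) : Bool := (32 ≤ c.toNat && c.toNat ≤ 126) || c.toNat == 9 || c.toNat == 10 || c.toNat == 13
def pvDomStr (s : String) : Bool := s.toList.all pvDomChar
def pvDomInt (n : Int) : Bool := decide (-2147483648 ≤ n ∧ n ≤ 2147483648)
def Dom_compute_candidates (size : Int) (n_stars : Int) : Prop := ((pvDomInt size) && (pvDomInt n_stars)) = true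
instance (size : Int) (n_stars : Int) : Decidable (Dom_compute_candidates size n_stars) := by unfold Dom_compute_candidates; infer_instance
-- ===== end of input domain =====

-- B replaces A's depth-first backtracking by a breadth-first product build over the
-- shifted domain [0, size-n_stars+1) (strictly increasing tuples, then c_i = d_i + i);
-- objective: alternative algorithm of similar cost.


-- ===== PORT A =====
-- 'recurse': fuel is only a totality guard (= number of stars still to place; it is
-- enough for every input with 0 ≤ n_stars; for n_stars < 0 the Python recursion does
-- not terminate unless the first range is empty, and such inputs are outside Pre_).
def pvRecurseA (size : Int) (n_stars : Int) : Nat → List (List Int) → List Int → List (List Int)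
  | fuel, candidates, cols =>
    if (cols.length : Int) = n_stars then candidates ++ [cols]
    else
      match fuel with
      | 0 => candidates
      | fuel + 1 =>
        (PySem.List.pyRange (match cols.getLast? with | some l => l + 2 | none => 0)
            (size - 2 * (n_stars - (cols.length : Int) - 1)) 1).foldl
          (fun acc c => pvRecurseA size n_stars fuel acc (cols ++ [c])) candidates

def compute_candidates (size : Int) (n_stars : Int) : List (List Int) :=
  pvRecurseA size n_stars n_stars.toNat [] []

-- ===== PORT B =====
def compute_candidates_alt (size : Int) (n_stars : Int) : List (List Int) :=
  let m := size - n_stars + 1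
  if n_stars > 0 ∧ n_stars > m then []
  else
  let combos := (PySem.List.pyRange 0 n_stars 1).foldl
    (fun combos _ => combos.flatMap (fun c =>
      (PySem.List.pyRange (match c.getLast? with | some l => l + 1 | none => 0) m 1).map
        (fun d => c ++ [d]))) [[]]
  combos.map (fun c => (PySem.List.enumerate c 0).map (fun p => p.2 + p.1))

-- ===== PRECONDITION & SPEC =====
-- Pre_ excludes negative n_stars, where A's unbounded recursion raises RecursionError
-- for most sizes and only accidentally returns [] when the very first range happens
-- to be empty (B returns [[]] there).
def Pre_compute_candidates (size : Int) (n_stars : Int) : Prop := 0 ≤ n_stars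
instance (size : Int) (n_stars : Int) : Decidable (Pre_compute_candidates size n_stars) := by unfold Pre_compute_candidates; infer_instance

def pvWitness_compute_candidates : Int × Int := (7, 3)

def Spec_compute_candidates (size : Int) (n_stars : Int) (out : List (List Int)) : Prop := out = compute_candidates_alt size n_stars
instance (size : Int) (n_stars : Int) (out : List (List Int)) : Decidable (Spec_compute_candidates size n_stars out) := by unfold Spec_compute_candidates; infer_instance

-- ===== CLAIM (what is proved, stated in full; the proofs are below) =====
def Claim_equal_compute_candidates : Prop := ∀ (size : Int) (n_stars : Int), Dom_compute_candidates size n_stars → Pre_compute_candidates size n_stars → Spec_compute_candidates size n_stars (compute_candidates size n_stars)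

-- ===== LEMMAS AND PROOFS =====

-- Reference form of A's recursion: length-k gap-≥2 lists, next column ≥ t.
def pvRecA (size : Int) : Nat → Int → List (List Int)
  | 0, _ => [[]]
  | k + 1, t =>
    (PySem.List.pyRange t (size - 2 * (k : Int)) 1).flatMap
      (fun c => (pvRecA size k (c + 2)).map (fun r => c :: r))

-- Reference form of B's level build: length-k strictly increasing lists over [s, m).
def pvFront (m : Int) : Nat → Int → List (List Int)
  | 0, _ => [[]]
  | k + 1, s =>
    (PySem.List.pyRange s m 1).flatMap
      (fun d => (pvFront m k (d + 1)).map (fun r => d :: r))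

-- position shift: pvSh a [d₀, d₁, …] = [d₀+a, d₁+a+1, …]
def pvSh : Int → List Int → List Int
  | _, [] => []
  | a, d :: c => (d + a) :: pvSh (a + 1) c

-- one level of B's build
def pvExt (m s0 : Int) (L : List (List Int)) : List (List Int) :=
  L.flatMap (fun c =>
    (PySem.List.pyRange (match c.getLast? with | some l => l + 1 | none => s0) m 1).map
      (fun d => c ++ [d]))

theorem pvEnumerate_sh (c : List Int) : ∀ (a : Int),
    (PySem.List.enumerate c a).map (fun p => p.2 + p.1) = pvSh a c := by
  induction c with
  | nil => intro a; simp [PySem.List.enumerate_nil, pvSh]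
  | cons d c ih =>
    intro a
    simp only [PySem.List.enumerate_cons, List.map_cons, pvSh, ih (a + 1)]

theorem pvFlatMap_trunc (F : Int → List (List Int)) (b' : Int)
    (h : ∀ d, b' ≤ d → F d = []) :
    ∀ (b s : Int), b' ≤ b → (PySem.List.pyRange s b 1).flatMap F = (PySem.List.pyRange s b' 1).flatMap F := by
  intro b
  induction hn : (b - b').toNat generalizing b with
  | zero =>
    intro s hb
    have : b = b' := by omega
    subst this; rfl
  | succ n ih =>
    intro s hb
    have hb' : b' < b := by omega
    by_cases hs : s ≤ b - 1
    · have hsplit : PySem.List.pyRange s b 1 = PySem.List.pyRange s (b - 1) 1 ++ [b - 1] := by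
        have := PySem.List.pyRange_one_succ_right (a := s) (b := b - 1) hs
        simpa using this
      rw [hsplit, List.flatMap_append]
      have hnil : F (b - 1) = [] := h _ (by omega)
      simp only [List.flatMap_cons, List.flatMap_nil, hnil, List.append_nil]
      exact ih (b - 1) (by omega) s (by omega)
    · rw [PySem.List.pyRange_one_eq_nil (by omega : b ≤ s),
        PySem.List.pyRange_one_eq_nil (by omega : b' ≤ s)]

theorem pvFront_nil (m : Int) : ∀ (k : Nat) (x : Int), m - ((k : Int) + 1) < x →
    pvFront m (k + 1) x = [] := by
  intro k
  induction k with
  | zero =>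
    intro x hx
    have : m ≤ x := by omega
    simp [pvFront, PySem.List.pyRange_one_eq_nil this]
  | succ k ih =>
    intro x hx
    rw [pvFront]
    rw [List.flatMap_eq_nil_iff]
    intro d hd
    have hd' := (PySem.List.mem_pyRange_one.mp hd).1
    rw [ih (d + 1) (by omega)]
    simp

-- pruning the top-level range: values ≥ m - k cannot be extended to k more elements
theorem pvFront_prune (m : Int) (k : Nat) (s : Int) :
    pvFront m (k + 1) s =
      (PySem.List.pyRange s (m - (k : Int)) 1).flatMap
        (fun d => (pvFront m k (d + 1)).map (fun r => d :: r)) := by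
  cases k with
  | zero => simp [pvFront]
  | succ k =>
    rw [pvFront]
    exact pvFlatMap_trunc
      (fun d => (pvFront m (k + 1) (d + 1)).map (fun r => d :: r)) (m - ((k : Int) + 1))
      (fun d hd => by
        show (pvFront m (k + 1) (d + 1)).map (fun r => d :: r) = []
        rw [pvFront_nil m k (d + 1) (by omega)]; simp)
      m s (by omega)

theorem pvRange_shift (t b a : Int) :
    PySem.List.pyRange (t - a) (b - a) 1 = (PySem.List.pyRange t b 1).map (fun x => x - a) := by
  rw [PySem.List.pyRange_one, PySem.List.pyRange_one]
  have hbt : b - a - (t - a) = b - t := by ring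
  rw [hbt, List.map_map]
  apply List.map_congr_left
  intro x _
  simp only [Function.comp_apply]
  ring

-- MAIN: A's tight gap-2 enumeration = shifted strictly-increasing enumeration
theorem pvMain (size : Int) : ∀ (k : Nat) (a t : Int),
    pvRecA size k t = (pvFront (size - (k : Int) + 1 - a) k (t - a)).map (pvSh a) := by
  intro k
  induction k with
  | zero => intro a t; simp [pvRecA, pvFront, pvSh]
  | succ k ih =>
    intro a t
    rw [pvRecA, pvFront_prune]
    have hm : size - ((k : Int) + 1) + 1 - a - (k : Int) = (size - 2 * (k : Int)) - a := by ring
    push_cast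
    rw [hm, pvRange_shift t (size - 2 * (k : Int)) a, List.flatMap_map, List.map_flatMap]
    refine List.flatMap_congr ?_
    intro c _
    have hmm : size - ((k : Int) + 1) + 1 - a = size - (k : Int) + 1 - (a + 1) := by ring
    have ht : c - a + 1 = (c + 2) - (a + 1) := by ring
    rw [hmm, ht, List.map_map]
    have hfun : (pvSh a ∘ fun r => (c - a) :: r) = ((fun r => c :: r) ∘ pvSh (a + 1)) := by
      funext r
      simp only [Function.comp_apply, pvSh]
      have : c - a + a = c := by ring
      rw [this]
    rw [hfun, ← List.map_map, ← ih (a + 1) (c + 2)]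

-- A's accumulator recursion computes pvRecA
theorem pvRecurseA_eq (size n_stars : Int) : ∀ (k : Nat) (cand : List (List Int)) (cols : List Int),
    (cols.length : Int) + (k : Int) = n_stars →
    pvRecurseA size n_stars k cand cols
      = cand ++ (pvRecA size k (match cols.getLast? with | some l => l + 2 | none => 0)).map
          (fun r => cols ++ r) := by
  intro k
  induction k with
  | zero =>
    intro cand cols hlen
    rw [pvRecurseA, if_pos (by omega)]
    simp [pvRecA]
  | succ k ih =>
    intro cand cols hlen
    rw [pvRecurseA, if_neg (by omega)]
    have hb : size - 2 * (n_stars - (cols.length : Int) - 1) = size - 2 * (k : Int) := by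
      push_cast at hlen ⊢; omega
    rw [hb, pvRecA, List.map_flatMap]
    have hstep : ∀ (acc : List (List Int)) (c : Int),
        pvRecurseA size n_stars k acc (cols ++ [c])
          = acc ++ (pvRecA size k (c + 2)).map (fun r => (cols ++ [c]) ++ r) := by
      intro acc c
      have := ih acc (cols ++ [c]) (by simp only [List.length_append, List.length_cons, List.length_nil]; push_cast at hlen ⊢; omega)
      simpa [List.getLast?_concat] using this
    calc (PySem.List.pyRange (match cols.getLast? with | some l => l + 2 | none => 0)
            (size - 2 * (k : Int)) 1).foldl
          (fun acc c => pvRecurseA size n_stars k acc (cols ++ [c])) cand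
        = (PySem.List.pyRange (match cols.getLast? with | some l => l + 2 | none => 0)
            (size - 2 * (k : Int)) 1).foldl
          (fun acc c => acc ++ (pvRecA size k (c + 2)).map (fun r => (cols ++ [c]) ++ r)) cand := by
          exact PySem.List.foldl_congr_mem _ _ _ _ (fun acc c _ => hstep acc c)
      _ = cand ++ (PySem.List.pyRange (match cols.getLast? with | some l => l + 2 | none => 0)
            (size - 2 * (k : Int)) 1).flatMap
            (fun c => (pvRecA size k (c + 2)).map (fun r => (cols ++ [c]) ++ r)) :=
          PySem.List.foldl_append_eq_flatMap _ _ _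
      _ = cand ++ (PySem.List.pyRange (match cols.getLast? with | some l => l + 2 | none => 0)
            (size - 2 * (k : Int)) 1).flatMap
            (fun c => ((pvRecA size k (c + 2)).map (fun r => c :: r)).map (fun r => cols ++ r)) := by
          congr 1
          refine List.flatMap_congr ?_
          intro c _
          rw [List.map_map]
          apply List.map_congr_left
          intro r _
          simp

-- one B level applied to pvFront extends it
theorem pvExt_front (m : Int) : ∀ (k : Nat) (s : Int),
    pvExt m s (pvFront m k s) = pvFront m (k + 1) s := by
  intro k
  induction k with
  | zero =>
    intro s
    show pvExt m s [[]] = pvFront m 1 s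
    simp [pvExt, pvFront, ← List.map_eq_flatMap]
  | succ k ih =>
    intro s
    rw [show pvFront m (k + 1) s
          = (PySem.List.pyRange s m 1).flatMap
              (fun d => (pvFront m k (d + 1)).map (fun r => d :: r)) from rfl]
    rw [pvExt, List.flatMap_assoc]
    rw [show pvFront m (k + 1 + 1) s
          = (PySem.List.pyRange s m 1).flatMap
              (fun d => (pvFront m (k + 1) (d + 1)).map (fun r => d :: r)) from rfl]
    refine List.flatMap_congr ?_
    intro d _
    rw [List.flatMap_map, ← ih (d + 1), pvExt, List.map_flatMap]
    refine List.flatMap_congr ?_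
    intro c _
    rw [List.map_map]
    cases c with
    | nil => simp
    | cons x c' =>
      cases h : (x :: c').getLast? with
      | none => simp [List.getLast?_eq_none_iff] at h
      | some l =>
        rw [show ((d :: x :: c').getLast? : Option Int) = (x :: c').getLast? from
              List.getLast?_cons_cons .., h]
        simp

-- n levels from [[]] give all strictly increasing n-tuples
theorem pvLevels (m : Int) : ∀ (n : Nat),
    (PySem.List.pyRange 0 (n : Int) 1).foldl (fun L _ => pvExt m 0 L) [[]] = pvFront m n 0 := by
  intro n
  induction n with
  | zero => simp [PySem.List.pyRange_one_eq_nil (by omega : (0:Int) ≤ 0), pvFront]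
  | succ n ih =>
    have : PySem.List.pyRange 0 ((n : Int) + 1) 1 = PySem.List.pyRange 0 (n : Int) 1 ++ [(n : Int)] :=
      PySem.List.pyRange_one_succ_right (by positivity)
    push_cast
    rw [this, List.foldl_append, ih]
    simpa using pvExt_front m n 0

-- ===== VERDICT (by name: the statement is the Claim_ definition above) =====
theorem compute_candidates_spec : Claim_equal_compute_candidates := by
  intro size n_stars _ hpre
  unfold Spec_compute_candidates compute_candidates compute_candidates_alt
  have hcast : ((n_stars.toNat : Nat) : Int) = n_stars := Int.toNat_of_nonneg hpre
  have hA : pvRecurseA size n_stars n_stars.toNat [] [] = pvRecA size n_stars.toNat 0 := by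
    have := pvRecurseA_eq size n_stars n_stars.toNat [] [] (by simpa using hcast)
    simpa using this
  by_cases hg : n_stars > 0 ∧ n_stars > size - n_stars + 1
  · rw [if_pos hg, hA]
    cases hk : n_stars.toNat with
    | zero => omega
    | succ k =>
      rw [pvRecA, PySem.List.pyRange_one_eq_nil (by omega : size - 2 * (k : Int) ≤ 0)]
      simp
  · rw [if_neg hg]
    show pvRecurseA size n_stars n_stars.toNat [] []
        = ((PySem.List.pyRange 0 n_stars 1).foldl
            (fun L _ => pvExt (size - n_stars + 1) 0 L) [[]]).map
          (fun c => (PySem.List.enumerate c 0).map (fun p => p.2 + p.1))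
    rw [hA, ← hcast, Int.toNat_natCast,
        pvLevels (size - ((n_stars.toNat : Nat) : Int) + 1) n_stars.toNat,
        pvMain size n_stars.toNat 0 0]
    simp only [sub_zero]
    apply List.map_congr_left
    intro c _
    exact (pvEnumerate_sh c 0).symm
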